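-- pv_equiv track=rewrite | github.com/sbdzdz/python-katas | codility/genomic_range_query.py | calculate_prefsum
-- ===== SOURCE A (Python) =====
-- def calculate_prefsum(S):
--     impact = {'A':0, 'C':1, 'G':2, 'T':3}
--     length = len(S)
--     prefsum = [[0]*4]*(length+1)
--
--     for i in range(1, length+1):
--         prefsum[i]=list(prefsum[i-1])
--         prefsum[i][impact[S[i-1]]] += 1
--     return prefsum
-- ===== SOURCE B (Python) =====
-- def calculate_prefsum(S):
--     impact = {'A': 0, 'C': 1, 'G': 2, 'T': 3}
--     idx = [impact[ch] for ch in S]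
--     cols = []
--     for c in range(4):
--         run = 0
--         col = [0]
--         for v in idx:
--             run += (v == c)
--             col.append(run)
--         cols.append(col)
--     return [list(row) for row in zip(*cols)]
-- ===== Notes on version B (the rewrite author's own statement) =====
-- stated objective: alternative
-- what changed: B maps the string to channel indices once, then computes each of the four prefix-count columns with its own running accumulator and transposes the columns into rows, instead of A's loop that copies the whole previous row and increments one cell.
import Mathlib
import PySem

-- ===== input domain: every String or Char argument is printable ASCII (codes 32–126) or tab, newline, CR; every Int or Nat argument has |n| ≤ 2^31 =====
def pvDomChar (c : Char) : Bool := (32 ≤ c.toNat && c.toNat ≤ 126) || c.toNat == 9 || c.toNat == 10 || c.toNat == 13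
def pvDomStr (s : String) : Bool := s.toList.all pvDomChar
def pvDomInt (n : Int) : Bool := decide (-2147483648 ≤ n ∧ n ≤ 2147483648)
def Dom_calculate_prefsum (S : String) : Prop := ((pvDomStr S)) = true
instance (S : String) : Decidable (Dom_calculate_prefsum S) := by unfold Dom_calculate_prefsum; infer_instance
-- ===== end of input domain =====

-- B fills the table per channel (index list once, four running-sum columns, transpose)
-- instead of A's copy-previous-row loop; objective: alternative decomposition, same O(n) cost.

-- ===== PORT A =====
-- the dict literal {'A':0,'C':1,'G':2,'T':3} (shared by both ports)
def pvImpact : PySem.Dict Char Int := PySem.Dict.ofList [('A', 0), ('C', 1), ('G', 2), ('T', 3)]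

-- loop body of A: prefsum[i] = list(prefsum[i-1]); prefsum[i][impact[S[i-1]]] += 1
-- (indices i, i-1 and impact[...] are in range / present under Pre_, so getD/toNat are exact there)
def pvStepA (l : List Char) (prefsum : List (List Int)) (i : Nat) : List (List Int) :=
  let prev := prefsum.getD (i - 1) []
  let j := (pvImpact.getD (l.getD (i - 1) ' ') 0).toNat
  prefsum.set i (prev.set j (prev.getD j 0 + 1))

def calculate_prefsum (S : String) : List (List Int) :=
  let l := S.toList
  let length := l.length
  let prefsum : List (List Int) := List.replicate (length + 1) [0, 0, 0, 0]
  (List.range' 1 length).foldl (pvStepA l) prefsum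

-- ===== PORT B =====
-- inner loop of B for one channel c: run += (v == c); col.append(run)
def pvColStep (c : Int) (st : Int × List Int) (v : Int) : Int × List Int :=
  let run := st.1 + (if v == c then (1 : Int) else 0)
  (run, st.2 ++ [run])

def pvCol (idx : List Int) (c : Int) : List Int := (idx.foldl (pvColStep c) (0, [0])).2

-- zip(*cols) over the four equal-length columns, row by row
def pvZip4 : List Int → List Int → List Int → List Int → List (List Int)
  | a :: as, b :: bs, c :: cs, d :: ds => [a, b, c, d] :: pvZip4 as bs cs ds
  | _, _, _, _ => []

def calculate_prefsum_alt (S : String) : List (List Int) :=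
  let idx : List Int := S.toList.map (fun ch => pvImpact.getD ch 0)
  pvZip4 (pvCol idx 0) (pvCol idx 1) (pvCol idx 2) (pvCol idx 3)

-- ===== PRECONDITION & SPEC =====
-- Pre_ excludes strings containing a character other than the four bases A, C, G, T:
-- on those Python A (and B) raises KeyError.
def Pre_calculate_prefsum (S : String) : Prop :=
  (S.toList.all (fun c => c == 'A' || c == 'C' || c == 'G' || c == 'T')) = true
instance (S : String) : Decidable (Pre_calculate_prefsum S) := by
  unfold Pre_calculate_prefsum; infer_instance

def pvWitness_calculate_prefsum : String := "GATTACA"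

def Spec_calculate_prefsum (S : String) (out : List (List Int)) : Prop := out = calculate_prefsum_alt S
instance (S : String) (out : List (List Int)) : Decidable (Spec_calculate_prefsum S out) := by
  unfold Spec_calculate_prefsum; infer_instance

-- ===== CLAIM (what is proved, stated in full; the proofs are below) =====
def Claim_equal_calculate_prefsum : Prop := ∀ (S : String), Dom_calculate_prefsum S → Pre_calculate_prefsum S → Spec_calculate_prefsum S (calculate_prefsum S)

-- ===== LEMMAS AND PROOFS =====

-- channel index of a character, and the table rows A produces, defined by recursion on the string
def pvJ (ch : Char) : Int := pvImpact.getD ch 0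

def pvBump (row : List Int) (j : Nat) : List Int := row.set j (row.getD j 0 + 1)

def pvRows (r : List Int) : List Char → List (List Int)
  | [] => [r]
  | ch :: cs => r :: pvRows (pvBump r (pvJ ch).toNat) cs

-- the suffix of one column produced by pvColStep starting from running value r
def pvScan (c : Int) (r : Int) : List Char → List Int
  | [] => []
  | ch :: cs => (r + (if pvJ ch == c then 1 else 0)) :: pvScan c (r + (if pvJ ch == c then 1 else 0)) cs

lemma pvJ_cases (ch : Char) : pvJ ch = 0 ∨ pvJ ch = 1 ∨ pvJ ch = 2 ∨ pvJ ch = 3 := by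
  have h : pvImpact = PySem.Dict.mk [('A', 0), ('C', 1), ('G', 2), ('T', 3)] := by rfl
  unfold pvJ
  rw [h]
  simp [PySem.Dict.getD_eq_get?_getD, PySem.Dict.get?_mk_cons]
  split_ifs <;> tauto

-- A's fold, started after `done` finished rows with last row r, produces done ++ pvRows r cs
lemma pvA_fold (l : List Char) (cs : List Char) :
    ∀ (done : List (List Int)) (r : List Int), l.drop done.length = cs →
      (List.range' (done.length + 1) cs.length).foldl (pvStepA l)
          (done ++ r :: List.replicate cs.length [0, 0, 0, 0])
        = done ++ pvRows r cs := by
  induction cs with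
  | nil => intro done r _; simp [pvRows]
  | cons ch cs ih =>
    intro done r h
    have hch : l.getD done.length ' ' = ch := by
      have h1 : (List.drop done.length l)[0]? = some ch := by rw [h]; rfl
      rw [List.getElem?_drop] at h1
      simp only [Nat.add_zero] at h1
      simp [List.getD_eq_getElem?_getD, h1]
    rw [List.length_cons, List.replicate_succ, List.range'_succ, List.foldl_cons]
    have hstep : pvStepA l (done ++ r :: [0, 0, 0, 0] :: List.replicate cs.length [0, 0, 0, 0])
        (done.length + 1)
        = (done ++ [r]) ++ pvBump r (pvJ ch).toNat :: List.replicate cs.length [0, 0, 0, 0] := by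
      unfold pvStepA
      have hprev : (done ++ r :: [0, 0, 0, 0] :: List.replicate cs.length [0, 0, 0, 0]).getD
          (done.length + 1 - 1) [] = r := by
        simp [List.getD_eq_getElem?_getD]
      rw [hprev]
      simp only [Nat.add_sub_cancel, hch]
      rw [List.set_append]
      simp [pvBump, pvJ]
    rw [hstep]
    have hlen : done.length + 1 + 1 = (done ++ [r]).length + 1 := by simp
    have hdrop : l.drop (done ++ [r]).length = cs := by
      simp only [List.length_append, List.length_cons, List.length_nil]
      rw [← List.tail_drop, h]
      rfl
    rw [hlen, ih (done ++ [r]) (pvBump r (pvJ ch).toNat) hdrop]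
    simp [pvRows]

lemma pvA_eq (S : String) : calculate_prefsum S = pvRows [0, 0, 0, 0] S.toList := by
  unfold calculate_prefsum
  have := pvA_fold S.toList S.toList [] [0, 0, 0, 0] (by simp)
  simpa [List.replicate_succ] using this

-- B's per-channel fold produces acc ++ pvScan c r
lemma pvB_fold (c : Int) (cs : List Char) :
    ∀ (r : Int) (acc : List Int),
      ((cs.map (fun ch => pvImpact.getD ch 0)).foldl (pvColStep c) (r, acc)).2
        = acc ++ pvScan c r cs := by
  induction cs with
  | nil => intro r acc; simp [pvScan]
  | cons ch cs ih =>
    intro r acc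
    simp only [List.map_cons, List.foldl_cons, pvColStep]
    rw [ih]
    simp [pvScan, pvJ]

lemma pvB_eq (S : String) :
    calculate_prefsum_alt S
      = [0, 0, 0, 0] :: pvZip4 (pvScan 0 0 S.toList) (pvScan 1 0 S.toList)
          (pvScan 2 0 S.toList) (pvScan 3 0 S.toList) := by
  simp only [calculate_prefsum_alt, pvCol]
  rw [pvB_fold 0 S.toList 0 [0], pvB_fold 1 S.toList 0 [0], pvB_fold 2 S.toList 0 [0],
    pvB_fold 3 S.toList 0 [0]]
  simp [pvZip4]

-- the four scans zipped are exactly A's rows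
lemma pvMain (cs : List Char) :
    ∀ (r0 r1 r2 r3 : Int),
      pvRows [r0, r1, r2, r3] cs
        = [r0, r1, r2, r3] :: pvZip4 (pvScan 0 r0 cs) (pvScan 1 r1 cs) (pvScan 2 r2 cs)
            (pvScan 3 r3 cs) := by
  induction cs with
  | nil => intro r0 r1 r2 r3; simp [pvRows, pvScan, pvZip4]
  | cons ch cs ih =>
    intro r0 r1 r2 r3
    rcases pvJ_cases ch with h | h | h | h <;>
      simp [pvRows, pvScan, pvZip4, h, pvBump] <;>
      rw [ih]

-- ===== VERDICT (by name: the statement is the Claim_ definition above) =====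
theorem calculate_prefsum_spec : Claim_equal_calculate_prefsum := by
  intro S _ _
  unfold Spec_calculate_prefsum
  rw [pvA_eq, pvB_eq, pvMain]
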